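-- pv_equiv track=rewrite | github.com/TonyKat/test_lda_ne | test_work_version.py | number_punctuation
-- ===== SOURCE A (Python) =====
-- def number_punctuation(text):
--     punctuation = ['!', '"', '#', '$', '%', '&', "'", '(', ')', '*', '+', ',', '-', '.', '/', ':',
--                    ';', '<', '=', '>', '?', '@', '[', '\\', ']', '^', '_', '`', '{', '|', '}', '~',
--                    '—', '«', '»', '…', '–']
--     number_punct_begin = 0
--     number_punct_end = 0
--
--     for char in text:
--         if char in punctuation:
--             number_punct_begin += 1
--             continue
--         else:
--             for char_end in text[len(text):number_punct_begin:-1]: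
--                 if char_end in punctuation:
--                     number_punct_end += 1
--             break
--
--     return [number_punct_begin, number_punct_end]
-- ===== SOURCE B (Python) =====
-- def number_punctuation(text):
--     punct = set('!"#$%&\'()*+,-./:;<=>?@[\\]^_`{|}~\u2014\u00ab\u00bb\u2026\u2013')
--     begin = 0
--     for ch in text:
--         if ch not in punct:
--             break
--         begin += 1
--     total = sum(1 for ch in text if ch in punct)
--     return [begin, total - begin]
-- ===== Notes on version B (the rewrite author's own statement) =====
-- stated objective: simpler
-- what changed: B drops A's reverse-slice suffix scan: it counts the leading punctuation run, counts punctuation once over the whole text, and returns [begin, total - begin]; its punctuation set is a hash set where A scans a 37-element list per character.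
import Mathlib
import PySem

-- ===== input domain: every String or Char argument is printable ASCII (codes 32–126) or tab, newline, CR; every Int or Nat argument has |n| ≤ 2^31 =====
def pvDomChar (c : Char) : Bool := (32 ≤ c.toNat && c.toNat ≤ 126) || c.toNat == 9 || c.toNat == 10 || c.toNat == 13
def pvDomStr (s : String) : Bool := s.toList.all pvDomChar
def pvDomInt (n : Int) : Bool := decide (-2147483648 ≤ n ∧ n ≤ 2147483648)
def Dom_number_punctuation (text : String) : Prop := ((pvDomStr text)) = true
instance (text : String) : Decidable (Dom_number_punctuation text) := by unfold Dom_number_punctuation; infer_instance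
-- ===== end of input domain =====

-- B replaces A's reverse-slice suffix scan by one whole-text punctuation count: result is [begin, total - begin] (objective: simpler).

-- ===== PORT A =====
-- A's 'punctuation' list, in A's order
def punctA : List Char :=
  ['!', '"', '#', '$', '%', '&', '\'', '(', ')', '*', '+', ',', '-', '.', '/', ':',
   ';', '<', '=', '>', '?', '@', '[', '\\', ']', '^', '_', '`', '{', '|', '}', '~',
   '—', '«', '»', '…', '–']

-- A's inner loop: for char_end in <slice>: if char_end in punctuation: number_punct_end += 1
def aEndLoop (l : List Char) : Int :=
  l.foldl (fun acc c => if c ∈ punctA then acc + 1 else acc) 0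

-- A's outer loop: accumulate number_punct_begin; on the first non-punctuation char,
-- run the inner loop over text[len(text):number_punct_begin:-1] and break.
def aLoop (text : List Char) : List Char → Int → List Int
  | [], nb => [nb, 0]
  | c :: rs, nb =>
    if c ∈ punctA then aLoop text rs (nb + 1)
    else [nb, aEndLoop ((PySem.List.slice? text (some (text.length : Int)) (some nb) (-1)).getD [])]
    -- slice? with step -1 is never none; .getD [] only discharges the Option

def number_punctuation (text : String) : List Int :=
  aLoop text.toList text.toList 0

-- ===== PORT B =====
-- B's punct = set('!"#$%&\'()*+,-./:;<=>?@[\\]^_`{|}~—«»…–')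
def punctB : PySem.Set Char := PySem.Set.ofList "!\"#$%&'()*+,-./:;<=>?@[\\]^_`{|}~—«»…–".toList

-- B's first loop: for ch in text: if ch not in punct: break; begin += 1
def altBeginLoop : Int → List Char → Int
  | acc, [] => acc
  | acc, c :: rs => if ¬ (c ∈ punctB) then acc else altBeginLoop (acc + 1) rs

-- B's total = sum(1 for ch in text if ch in punct)
def altTotal (l : List Char) : Int :=
  l.foldl (fun acc c => if c ∈ punctB then acc + 1 else acc) 0

def number_punctuation_alt (text : String) : List Int :=
  let b := altBeginLoop 0 text.toList
  [b, altTotal text.toList - b]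

-- ===== PRECONDITION & SPEC =====
def Spec_number_punctuation (text : String) (out : List Int) : Prop := out = number_punctuation_alt text
instance (text : String) (out : List Int) : Decidable (Spec_number_punctuation text out) := by unfold Spec_number_punctuation; infer_instance

-- ===== CLAIM (what is proved, stated in full; the proofs are below) =====
def Claim_equal_number_punctuation : Prop := ∀ (text : String), Dom_number_punctuation text → Spec_number_punctuation text (number_punctuation text)

-- ===== LEMMAS AND PROOFS =====

theorem punctB_eq : punctB = punctA := by decide

theorem mem_punctB_iff (c : Char) : c ∈ punctB ↔ c ∈ punctA := by rw [punctB_eq]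

-- generic counting fold (both A's inner loop and B's total are instances)
def cntP {α : Type} (P : α → Prop) [DecidablePred P] (l : List α) : Int :=
  l.foldl (fun a c => if P c then a + 1 else a) 0

theorem cnt_shift {α : Type} (P : α → Prop) [DecidablePred P] (l : List α) : ∀ (acc : Int),
    l.foldl (fun a c => if P c then a + 1 else a) acc = acc + cntP P l := by
  induction l with
  | nil => intro acc; simp [cntP]
  | cons c rs ih =>
    intro acc
    unfold cntP
    rw [List.foldl_cons, List.foldl_cons, ih, ih]
    split_ifs <;> omega

theorem cnt_cons {α : Type} (P : α → Prop) [DecidablePred P] (c : α) (l : List α) :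
    cntP P (c :: l) = (if P c then 1 else 0) + cntP P l := by
  conv_lhs => unfold cntP
  rw [List.foldl_cons, cnt_shift]
  split_ifs <;> omega

theorem cnt_append {α : Type} (P : α → Prop) [DecidablePred P] (l1 l2 : List α) :
    cntP P (l1 ++ l2) = cntP P l1 + cntP P l2 := by
  conv_lhs => unfold cntP
  rw [List.foldl_append, cnt_shift]
  rfl

theorem cnt_reverse {α : Type} (P : α → Prop) [DecidablePred P] (l : List α) :
    cntP P l.reverse = cntP P l := by
  induction l with
  | nil => rfl
  | cons c rs ih =>
    rw [List.reverse_cons, cnt_append, ih, cnt_cons, cnt_cons]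
    have h0 : cntP P ([] : List α) = 0 := rfl
    rw [h0]
    split_ifs <;> omega

theorem cnt_congr {α : Type} (P Q : α → Prop) [DecidablePred P] [DecidablePred Q] (l : List α)
    (h : ∀ c ∈ l, (P c ↔ Q c)) : cntP P l = cntP Q l := by
  induction l with
  | nil => rfl
  | cons c rs ih =>
    rw [cnt_cons, cnt_cons, ih (fun x hx => h x (by simp [hx]))]
    have := h c (by simp)
    split_ifs <;> tauto

theorem cnt_all {α : Type} (P : α → Prop) [DecidablePred P] (l : List α)
    (h : ∀ c ∈ l, P c) : cntP P l = (l.length : Int) := by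
  induction l with
  | nil => rfl
  | cons c rs ih =>
    rw [cnt_cons, if_pos (h c (by simp)), ih (fun x hx => h x (by simp [hx]))]
    simp; ring

theorem aEndLoop_eq_cnt (l : List Char) : aEndLoop l = cntP (· ∈ punctA) l := rfl

theorem altTotal_eq_cnt (l : List Char) : altTotal l = cntP (· ∈ punctB) l := rfl

theorem aEndLoop_eq_altTotal (l : List Char) : aEndLoop l = altTotal l := by
  rw [aEndLoop_eq_cnt, altTotal_eq_cnt]
  exact cnt_congr _ _ l (fun c _ => (mem_punctB_iff c).symm)

theorem altBeginLoop_shift (l : List Char) : ∀ (acc : Int),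
    altBeginLoop acc l = acc + altBeginLoop 0 l := by
  induction l with
  | nil => intro acc; simp [altBeginLoop]
  | cons c rs ih =>
    intro acc
    simp only [altBeginLoop]
    by_cases hc : c ∈ punctB
    · rw [if_neg (by simp [hc]), if_neg (by simp [hc]), ih (acc + 1), ih (0 + 1)]
      ring
    · rw [if_pos (by simp [hc]), if_pos (by simp [hc])]
      ring

-- the reverse slice text[len(text):b:-1] is (drop (b+1) text).reverse
theorem filterMap_range_rev {α : Type} (xs : List α) : ∀ (m : Nat), m ≤ xs.length →
    (List.range m).filterMap (fun k => xs[xs.length - 1 - k]?) = (xs.drop (xs.length - m)).reverse := by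
  intro m
  induction m with
  | zero => intro _; simp
  | succ m ih =>
    intro hm
    rw [List.range_succ, List.filterMap_append, ih (by omega)]
    have hidx : xs.length - 1 - m < xs.length := by omega
    have hget : xs[xs.length - 1 - m]? = some xs[xs.length - 1 - m] := List.getElem?_eq_getElem hidx
    have hdrop : xs.drop (xs.length - (m + 1)) = xs[xs.length - 1 - m] :: xs.drop (xs.length - m) := by
      rw [show xs.length - (m + 1) = xs.length - 1 - m from by omega,
          List.drop_eq_getElem_cons hidx,
          show xs.length - 1 - m + 1 = xs.length - m from by omega]
    rw [hdrop]
    simp [hget]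

theorem slice_rev {α : Type} (xs : List α) (b : Nat) :
    (PySem.List.slice? xs (some (xs.length : Int)) (some (b : Int)) (-1)).getD []
      = (xs.drop (b + 1)).reverse := by
  unfold PySem.List.slice? PySem.List.sliceIndices
  simp only [if_neg (by norm_num : ¬ ((-1 : Int) = 0)), if_pos (by norm_num : (-1 : Int) < 0)]
  rcases Nat.eq_zero_or_pos xs.length with h0 | hpos
  · rcases List.eq_nil_iff_length_eq_zero.mpr h0 with rfl
    simp
  · have hstart : ¬ ((xs.length : Int) < 0) := by omega
    have hstop : ¬ ((b : Int) < 0) := by omega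
    simp only [hstart, hstop, if_false]
    have hmin : min (xs.length : Int) ((xs.length : Int) - 1) = (xs.length : Int) - 1 := by omega
    rw [hmin]
    by_cases hb : b + 1 ≥ xs.length
    · have h1 : min (b : Int) ((xs.length : Int) - 1) = (xs.length : Int) - 1 := by omega
      rw [h1]
      simp [List.drop_eq_nil_of_le hb]
    · have h1 : min (b : Int) ((xs.length : Int) - 1) = (b : Int) := by omega
      rw [h1]
      have hlt : (b : Int) < (xs.length : Int) - 1 := by omega
      rw [if_neg (show ¬ ((0 : Int) < -1) from by norm_num), if_pos hlt]
      have hd1 : ((xs.length : Int) - 1 - (b : Int) + - -1 - 1) / - -1 = (xs.length : Int) - 1 - (b : Int) := by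
        norm_num
      rw [hd1, show ((xs.length : Int) - 1 - (b : Int)).toNat = xs.length - 1 - b from by omega]
      have hfun : (fun k : Nat => xs[((xs.length : Int) - 1 + -1 * (k : Int)).toNat]?)
          = (fun k : Nat => xs[xs.length - 1 - k]?) := by
        funext k
        congr 1
        omega
      rw [hfun, filterMap_range_rev xs (xs.length - 1 - b) (by omega)]
      have : xs.length - (xs.length - 1 - b) = b + 1 := by omega
      rw [this]
      rfl

theorem altBeginLoop_all_punct (l : List Char) (h : ∀ c ∈ l, c ∈ punctB) :
    altBeginLoop 0 l = (l.length : Int) := by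
  induction l with
  | nil => rfl
  | cons c rs ih =>
    simp only [altBeginLoop]
    rw [if_neg (by simp [h c (by simp)])]
    rw [altBeginLoop_shift, ih (fun x hx => h x (by simp [hx]))]
    simp; ring

theorem aLoop_eq (rest : List Char) : ∀ (done : List Char), (∀ c ∈ done, c ∈ punctA) →
    aLoop (done ++ rest) rest (done.length : Int)
      = [altBeginLoop 0 (done ++ rest),
         altTotal (done ++ rest) - altBeginLoop 0 (done ++ rest)] := by
  induction rest with
  | nil =>
    intro done hd
    have hB : ∀ c ∈ done, c ∈ punctB := fun c hc => (mem_punctB_iff c).mpr (hd c hc)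
    simp only [List.append_nil, aLoop]
    rw [altBeginLoop_all_punct done hB, altTotal_eq_cnt, cnt_all _ done hB]
    simp
  | cons c rs ih =>
    intro done hd
    by_cases hc : c ∈ punctA
    · have hstep : aLoop (done ++ c :: rs) (c :: rs) (done.length : Int)
          = aLoop (done ++ c :: rs) rs ((done.length : Int) + 1) := by
        simp only [aLoop, if_pos hc]
      have hre : done ++ c :: rs = (done ++ [c]) ++ rs := by simp
      have hlen : ((done.length : Int) + 1) = (((done ++ [c]).length : Nat) : Int) := by
        simp
      rw [hstep, hre, hlen]
      exact ih (done ++ [c]) (by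
        intro x hx
        rcases List.mem_append.mp hx with h1 | h1
        · exact hd x h1
        · simp at h1; subst h1; exact hc)
    · have hcB : ¬ (c ∈ punctB) := by rw [mem_punctB_iff]; exact hc
      -- left side: break branch
      have hdrop : (done ++ c :: rs).drop (done.length + 1) = rs := by
        rw [show done.length + 1 = (done ++ [c]).length by simp,
            show done ++ c :: rs = (done ++ [c]) ++ rs by simp,
            List.drop_left]
      have hL : aLoop (done ++ c :: rs) (c :: rs) (done.length : Int)
          = [(done.length : Int), aEndLoop rs] := by
        simp only [aLoop, if_neg hc]
        rw [slice_rev (done ++ c :: rs) done.length, hdrop,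
            aEndLoop_eq_cnt, aEndLoop_eq_cnt, cnt_reverse]
      -- right side
      have hBdone : ∀ x ∈ done, x ∈ punctB := fun x hx => (mem_punctB_iff x).mpr (hd x hx)
      have hbegin : ∀ (ds : List Char), (∀ x ∈ ds, x ∈ punctB) →
          altBeginLoop 0 (ds ++ c :: rs) = (ds.length : Int) := by
        intro ds
        induction ds with
        | nil => intro _; simp [altBeginLoop, if_pos hcB]
        | cons d dt ihd =>
          intro hds
          simp only [List.cons_append, altBeginLoop]
          rw [if_neg (by simp [hds d (by simp)])]
          rw [altBeginLoop_shift, ihd (fun x hx => hds x (by simp [hx]))]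
          simp; ring
      have htot : altTotal (done ++ c :: rs) = (done.length : Int) + altTotal rs := by
        simp only [altTotal_eq_cnt]
        rw [show done ++ c :: rs = done ++ [c] ++ rs by simp,
            cnt_append, cnt_append, cnt_all _ done (fun x hx => (mem_punctB_iff x).mpr (hd x hx))]
        have : cntP (· ∈ punctB) [c] = 0 := by
          rw [cnt_cons, if_neg hcB]; rfl
        rw [this]; ring
      rw [hL, hbegin done hBdone, htot, aEndLoop_eq_altTotal,
          show (done.length : Int) + altTotal rs - (done.length : Int) = altTotal rs from by ring]

-- ===== VERDICT (by name: the statement is the Claim_ definition above) =====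
theorem number_punctuation_spec : Claim_equal_number_punctuation := by
  intro text _
  unfold Spec_number_punctuation number_punctuation number_punctuation_alt
  have h := aLoop_eq text.toList [] (by intro c hc; simp at hc)
  simp only [List.nil_append, List.length_nil, Nat.cast_zero] at h
  rw [h]
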